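-- pv_equiv track=rewrite | github.com/fmoeran/CP | problemsets/AddModulo10.py | two_can
-- ===== SOURCE A (Python) =====
-- def two_can(a, b):
--     while abs(a-b) >= 10:
--         if a %10 == 0 or b%10 == 0:
--             return False
--         if a < b:
--             a += a%10
--         else:
--             b += b%10
--
--     seena = {a%10}
--     seenb = {b%10}
--
--     while a != b:
--         if a < b:
--             a += a%10
--             if a%10 in seena:
--                 return False
--             seena.add(a%10)
--         else:
--             b += b%10#
--             if b%10 in seenb:
--                 return False
--             seenb.add(b%10)
--     return True
-- ===== SOURCE B (Python) =====
-- def _key(x):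
--     # O(1) canonical form: numbers ending in 0 are fixed points, numbers ending
--     # in 5 reach one (x+5); all other numbers fall into the 2-4-8-6 cycle, whose
--     # orbit is characterised by (value at first last-digit-2 point) mod 20.
--     d = x % 10
--     if d == 0:
--         return (0, x)
--     if d == 5:
--         return (0, x + 5)
--     while x % 10 != 2:
--         x += x % 10
--     return (1, x % 20)
--
--
-- def two_can(a, b):
--     return _key(a) == _key(b)
-- ===== Notes on version B (the rewrite author's own statement) =====
-- stated objective: faster
-- what changed: replaced A's step-by-step simulation (O(|a-b|) iterations plus a seen-digit cycle detector) by an O(1) closed form: each number is mapped to a canonical key (its fixed point if the last digit is 0 or 5, otherwise its first value with last digit 2 taken mod 20) and the answer is key equality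
import Mathlib
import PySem

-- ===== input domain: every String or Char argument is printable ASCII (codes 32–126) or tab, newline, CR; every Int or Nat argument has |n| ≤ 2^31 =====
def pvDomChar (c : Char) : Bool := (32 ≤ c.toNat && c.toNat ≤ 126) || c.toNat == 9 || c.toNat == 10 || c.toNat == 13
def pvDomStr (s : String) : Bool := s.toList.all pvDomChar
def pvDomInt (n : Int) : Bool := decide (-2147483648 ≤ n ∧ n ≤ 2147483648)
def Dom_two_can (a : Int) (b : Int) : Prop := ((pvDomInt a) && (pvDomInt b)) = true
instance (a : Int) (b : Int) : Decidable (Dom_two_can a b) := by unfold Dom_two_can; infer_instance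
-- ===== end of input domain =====

-- B replaces A's O(|a-b|) step-by-step simulation by an O(1) canonical key per number.
-- Python's x % 10 is Lean's Int emod '% 10' exactly, since the divisor 10 is positive
-- (PySem.Int.mod_eq_emod_of_pos); the ports therefore use '%' directly.

-- ===== PORT A =====
-- first while loop of A: returns none where A returns False, else the final (a, b)
def two_can_loop1 (a : Int) (b : Int) : Option (Int × Int) :=
  if 10 ≤ (a - b).natAbs then
    if a % 10 == 0 || b % 10 == 0 then none
    else if a < b then two_can_loop1 (a + a % 10) b
    else two_can_loop1 a (b + b % 10)
  else some (a, b)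
termination_by (a - b).natAbs
decreasing_by
  · simp only [Bool.or_eq_true, beq_iff_eq, not_or] at *; omega
  · simp only [Bool.or_eq_true, beq_iff_eq, not_or] at *; omega

-- second while loop of A; the fuel only makes the recursion total: every iteration
-- either returns or adds a new digit (0..9) to one of the two seen sets, so at most
-- 19 recursive calls can happen from the entry states (each set starts with 1 digit)
def two_can_loop2 : Nat → Int → Int → PySem.Set Int → PySem.Set Int → Bool
  | 0, _, _, _, _ => false
  | n + 1, a, b, seena, seenb =>
    if a ≠ b then
      if a < b then
        if seena.contains ((a + a % 10) % 10) then false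
        else two_can_loop2 n (a + a % 10) b (seena.add ((a + a % 10) % 10)) seenb
      else
        if seenb.contains ((b + b % 10) % 10) then false
        else two_can_loop2 n a (b + b % 10) seena (seenb.add ((b + b % 10) % 10))
    else true

def two_can (a : Int) (b : Int) : Bool :=
  match two_can_loop1 a b with
  | none => false
  | some (a', b') =>
      two_can_loop2 25 a' b' (PySem.Set.ofList [a' % 10]) (PySem.Set.ofList [b' % 10])

-- ===== PORT B =====
-- the 'while x % 10 != 2' loop of _key; it runs at most 4 steps, fuel 5 suffices
def keyLoop : Nat → Int → Int
  | 0, x => x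
  | n + 1, x => if x % 10 ≠ 2 then keyLoop n (x + x % 10) else x

-- _key from Source B
def pyKey (x : Int) : Int × Int :=
  if x % 10 == 0 then (0, x)
  else if x % 10 == 5 then (0, x + 5)
  else (1, keyLoop 5 x % 20)

def two_can_alt (a : Int) (b : Int) : Bool := pyKey a == pyKey b

-- ===== PRECONDITION & SPEC =====
def Spec_two_can (a : Int) (b : Int) (out : Bool) : Prop := out = two_can_alt a b
instance (a : Int) (b : Int) (out : Bool) : Decidable (Spec_two_can a b out) := by unfold Spec_two_can; infer_instance

-- ===== CLAIM (what is proved, stated in full; the proofs are below) =====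
def Claim_equal_two_can : Prop := ∀ (a : Int) (b : Int), Dom_two_can a b → Spec_two_can a b (two_can a b)

-- ===== LEMMAS AND PROOFS =====

-- keyLoop mod 20 only depends on the argument mod 20
lemma keyLoop_mod (n : Nat) : ∀ x : Int, keyLoop n x % 20 = keyLoop n (x % 20) % 20 := by
  induction n with
  | zero => intro x; simp only [keyLoop]; omega
  | succ n ih =>
    intro x
    have h10 : (x % 20) % 10 = x % 10 := by omega
    by_cases h2 : x % 10 = 2
    · simp only [keyLoop, h10, h2]; norm_num
    · simp only [keyLoop, h10, h2, if_pos, ne_eq, not_false_iff]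
      rw [ih (x + x % 10), ih (x % 20 + x % 10)]
      have : (x + x % 10) % 20 = (x % 20 + x % 10) % 20 := by omega
      rw [this]

-- one Python step x += x % 10 does not change the canonical key
lemma pyKey_step (x : Int) : pyKey (x + x % 10) = pyKey x := by
  by_cases h0 : x % 10 = 0
  · simp [h0]
  · by_cases h5 : x % 10 = 5
    · have : (x + x % 10) % 10 = 0 := by omega
      simp [pyKey, h5]; omega
    · have hne0 : (x + x % 10) % 10 ≠ 0 := by omega
      have hne5 : (x + x % 10) % 10 ≠ 5 := by omega
      simp only [pyKey, beq_iff_eq, h0, h5, hne0, hne5, if_false]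
      refine congrArg _ ?_
      rw [keyLoop_mod 5 (x + x % 10), keyLoop_mod 5 x]
      have hr0 : 0 ≤ x % 20 := by omega
      have hr1 : x % 20 < 20 := by omega
      have harg : (x + x % 10) % 20 = (x % 20 + (x % 20) % 10) % 20 := by omega
      have hd0 : (x % 20) % 10 ≠ 0 := by omega
      have hd5 : (x % 20) % 10 ≠ 5 := by omega
      rw [harg]
      generalize hx : x % 20 = r at *
      interval_cases r <;> simp_all <;> decide

-- A's first loop returns False only when the keys differ
lemma pyKey_ne_far (a b : Int) (hfar : 10 ≤ (a - b).natAbs) (h0 : a % 10 = 0 ∨ b % 10 = 0) :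
    pyKey a ≠ pyKey b := by
  rcases h0 with h | h
  · by_cases hb0 : b % 10 = 0
    · simp [pyKey, h, hb0, Prod.ext_iff]; omega
    · by_cases hb5 : b % 10 = 5
      · simp [pyKey, h, hb5, Prod.ext_iff]; omega
      · have hd : ¬ (10 ∣ b) := by omega
        simp [pyKey, h, hd, hb5, Prod.ext_iff]
  · by_cases ha0 : a % 10 = 0
    · simp [pyKey, h, ha0, Prod.ext_iff]; omega
    · by_cases ha5 : a % 10 = 5
      · simp [pyKey, h, ha5, Prod.ext_iff]; omega
      · have hd : ¬ (10 ∣ a) := by omega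
        simp [pyKey, h, hd, ha5, Prod.ext_iff]

-- A's second loop only depends on (a - b, a mod 20, b mod 20) and the two sets
lemma loop2_abs (n : Nat) : ∀ (a b a2 b2 : Int) (sa sb : PySem.Set Int),
    a - b = a2 - b2 → a % 20 = a2 % 20 → b % 20 = b2 % 20 →
    two_can_loop2 n a b sa sb = two_can_loop2 n a2 b2 sa sb := by
  induction n with
  | zero => intros; rfl
  | succ n ih =>
    intro a b a2 b2 sa sb hd h20a h20b
    by_cases hab : a = b
    · have hab2 : a2 = b2 := by omega
      simp only [two_can_loop2, hab, hab2, ne_eq, not_true_eq_false, if_false]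
    · have hab2 : a2 ≠ b2 := by omega
      simp only [two_can_loop2]
      rw [if_pos (show a ≠ b from hab), if_pos hab2]
      by_cases hlt : a < b
      · have hlt2 : a2 < b2 := by omega
        have hdg : (a + a % 10) % 10 = (a2 + a2 % 10) % 10 := by omega
        rw [if_pos hlt, if_pos hlt2, hdg]
        by_cases hc : sa.contains ((a2 + a2 % 10) % 10) = true
        · rw [if_pos hc, if_pos hc]
        · rw [if_neg hc, if_neg hc]
          exact ih _ _ _ _ _ _ (by omega) (by omega) h20b
      · have hlt2 : ¬ a2 < b2 := by omega
        have hdg : (b + b % 10) % 10 = (b2 + b2 % 10) % 10 := by omega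
        rw [if_neg hlt, if_neg hlt2, hdg]
        by_cases hc : sb.contains ((b2 + b2 % 10) % 10) = true
        · rw [if_pos hc, if_pos hc]
        · rw [if_neg hc, if_neg hc]
          exact ih _ _ _ _ _ _ (by omega) h20a (by omega)

-- key equality only depends on (a - b, a mod 20, b mod 20)
lemma pyKeyEq_abs (a b a2 b2 : Int) (hd : a - b = a2 - b2) (h20a : a % 20 = a2 % 20)
    (h20b : b % 20 = b2 % 20) : (pyKey a = pyKey b) ↔ (pyKey a2 = pyKey b2) := by
  have ha : a % 10 = a2 % 10 := by omega
  have hb : b % 10 = b2 % 10 := by omega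
  unfold pyKey
  rw [ha, hb, keyLoop_mod 5 a, keyLoop_mod 5 b, keyLoop_mod 5 a2, keyLoop_mod 5 b2, h20a, h20b]
  split_ifs <;> simp [Prod.ext_iff] <;> omega

-- the finite core: on canonical representatives the two programs agree
lemma loop2_entry_check : ∀ r ∈ Finset.Icc (0 : Int) 19, ∀ d ∈ Finset.Icc (-9 : Int) 9,
    two_can_loop2 25 r (r - d) (PySem.Set.ofList [r % 10]) (PySem.Set.ofList [(r - d) % 10])
      = decide (pyKey r = pyKey (r - d)) := by decide

lemma loop2_entry (a b : Int) (h : (a - b).natAbs < 10) :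
    two_can_loop2 25 a b (PySem.Set.ofList [a % 10]) (PySem.Set.ofList [b % 10])
      = decide (pyKey a = pyKey b) := by
  have hda : a % 10 = (a % 20) % 10 := by omega
  have hdb : b % 10 = ((a % 20) - (a - b)) % 10 := by omega
  rw [hda, hdb,
    loop2_abs 25 a b (a % 20) ((a % 20) - (a - b)) _ _ (by omega) (by omega) (by omega),
    decide_eq_decide.mpr (pyKeyEq_abs a b (a % 20) ((a % 20) - (a - b)) (by omega) (by omega) (by omega))]
  exact loop2_entry_check (a % 20) (Finset.mem_Icc.mpr (by omega)) (a - b)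
    (Finset.mem_Icc.mpr (by omega))

lemma loop1_none (a b : Int) (h : two_can_loop1 a b = none) : pyKey a ≠ pyKey b := by
  fun_induction two_can_loop1 a b with
  | case1 a b hfar hz =>
    simp only [Bool.or_eq_true, beq_iff_eq] at hz
    exact pyKey_ne_far a b hfar hz
  | case2 a b hfar hz hlt ih =>
    rw [← pyKey_step a]; exact ih h
  | case3 a b hfar hz hlt ih =>
    rw [← pyKey_step b]; exact ih h
  | case4 a b hfar => simp at h

lemma loop1_some (a b a' b' : Int) (h : two_can_loop1 a b = some (a', b')) :
    pyKey a' = pyKey a ∧ pyKey b' = pyKey b ∧ (a' - b').natAbs < 10 := by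
  fun_induction two_can_loop1 a b with
  | case1 a b hfar hz => simp at h
  | case2 a b hfar hz hlt ih =>
    obtain ⟨h1, h2, h3⟩ := ih h
    exact ⟨by rw [h1, pyKey_step a], h2, h3⟩
  | case3 a b hfar hz hlt ih =>
    obtain ⟨h1, h2, h3⟩ := ih h
    exact ⟨h1, by rw [h2, pyKey_step b], h3⟩
  | case4 a b hfar =>
    simp only [Option.some.injEq, Prod.mk.injEq] at h
    obtain ⟨h1, h2⟩ := h
    subst h1; subst h2
    exact ⟨rfl, rfl, by omega⟩

lemma two_can_eq_keys (a b : Int) : two_can a b = decide (pyKey a = pyKey b) := by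
  unfold two_can
  cases heq : two_can_loop1 a b with
  | none =>
    have := loop1_none a b heq
    simp [this]
  | some p =>
    obtain ⟨a', b'⟩ := p
    obtain ⟨h1, h2, h3⟩ := loop1_some a b a' b' heq
    show two_can_loop2 25 a' b' (PySem.Set.ofList [a' % 10]) (PySem.Set.ofList [b' % 10])
      = decide (pyKey a = pyKey b)
    rw [loop2_entry a' b' h3, h1, h2]

-- ===== VERDICT (by name: the statement is the Claim_ definition above) =====
theorem two_can_spec : Claim_equal_two_can := by
  intro a b _
  unfold Spec_two_can two_can_alt
  rw [two_can_eq_keys a b]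
  by_cases h : pyKey a = pyKey b <;> simp [h]
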